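-- pv_equiv track=rewrite | github.com/jraymondli/usaco-1 | 2017/January/January 2017 Prob 3/2017_January_3_cowtip.py | follow_through
-- ===== SOURCE A (Python) =====
-- def follow_through(grid):
--     usages = 0
--     for row in map(lambda x: -x, range(1, len(grid)+1)):
--         for column in map(lambda x: -x, range(1, len(grid[row]) + 1)):
--             if grid[row][column] == 1:
--                 for r in range(len(grid) + 1 + row):
--                     for c in range(len(grid) + 1 + column):
--                         if grid[r][c] == 0:
--                             grid[r][c] = 1
--                         elif grid[r][c] == 1:
--                             grid[r][c] = 0
--                 usages += 1
--     return usages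
-- ===== SOURCE B (Python) =====
-- def follow_through(grid):
--     n = len(grid)
--     count = 0
--     below = {}
--     for r in range(n - 1, -1, -1):
--         cur = {}
--         for c in range(len(grid[r]) - 1, -1, -1):
--             q = cur.get(c + 1, 0) ^ below.get(c, 0) ^ below.get(c + 1, 0)
--             v = grid[r][c]
--             if (v == 0 or v == 1) and v ^ q == 1:
--                 count += 1
--                 q ^= 1
--             cur[c] = q
--         below = cur
--     return count
-- ===== Notes on version B (the rewrite author's own statement) =====
-- stated objective: alternative
-- what changed: A simulates the process, re-scanning and mutating the whole prefix rectangle of the grid for every triggered flip; B never mutates the grid and instead derives each cell's flip parity from rolling quadrant-parity (2-D XOR difference) rows kept in dicts, counting triggers in a single pass over the cells.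
-- outside the precondition, e.g. on follow_through([[0, 1, 1, 0], [0, 2, -1]]): A returns 3, B returns 2
import Mathlib
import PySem

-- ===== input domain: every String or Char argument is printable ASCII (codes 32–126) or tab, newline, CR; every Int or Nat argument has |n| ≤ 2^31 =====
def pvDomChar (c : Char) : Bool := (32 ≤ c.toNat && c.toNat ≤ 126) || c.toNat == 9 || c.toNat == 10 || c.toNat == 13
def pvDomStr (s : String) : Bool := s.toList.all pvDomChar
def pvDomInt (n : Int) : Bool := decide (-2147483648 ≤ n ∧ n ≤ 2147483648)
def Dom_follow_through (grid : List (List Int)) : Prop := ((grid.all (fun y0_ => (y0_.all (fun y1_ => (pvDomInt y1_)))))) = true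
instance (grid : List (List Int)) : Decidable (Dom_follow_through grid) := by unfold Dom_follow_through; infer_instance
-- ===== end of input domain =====

-- B replaces A's mutate-and-rescan simulation by a quadrant-parity (2-D XOR difference)
-- recurrence that never touches the grid; A mutates its argument in place, B does not, so the
-- equivalence proved here is about the RETURN value only.

-- shared Python-indexing helpers (grid[i][j] reads and writes, Python semantics)
def pvGet2 (g : List (List Int)) (i j : Int) : Int :=
  PySem.List.pyGetD (PySem.List.pyGetD g i []) j 0

def pvSet2 (g : List (List Int)) (i j : Int) (v : Int) : List (List Int) :=
  PySem.List.pySetD g i (PySem.List.pySetD (PySem.List.pyGetD g i []) j v)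

-- ===== PORT A =====
def follow_through (grid : List (List Int)) : Int :=
  (((PySem.List.pyRange 1 (PySem.List.len grid + 1) 1).map (fun x => -x)).foldl
    (fun (st : List (List Int) × Int) row =>
      ((PySem.List.pyRange 1 (PySem.List.len (PySem.List.pyGetD st.1 row []) + 1) 1).map (fun x => -x)).foldl
        (fun (st : List (List Int) × Int) column =>
          if pvGet2 st.1 row column = 1 then
            (((PySem.List.pyRange 0 (PySem.List.len st.1 + 1 + row) 1).foldl
                (fun (g : List (List Int)) r =>
                  (PySem.List.pyRange 0 (PySem.List.len st.1 + 1 + column) 1).foldl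
                    (fun (g : List (List Int)) c =>
                      if pvGet2 g r c = 0 then pvSet2 g r c 1
                      else if pvGet2 g r c = 1 then pvSet2 g r c 0
                      else g) g) st.1),
             st.2 + 1)
          else st) st)
    (grid, 0)).2

-- ===== PORT B =====
def follow_through_alt (grid : List (List Int)) : Int :=
  let n : Int := PySem.List.len grid
  ((PySem.List.pyRange (n - 1) (-1) (-1)).foldl
    (fun (st : PySem.Dict Int Int × Int) r =>
      (PySem.List.pyRange (PySem.List.len (PySem.List.pyGetD grid r []) - 1) (-1) (-1)).foldl
        (fun (st2 : PySem.Dict Int Int × Int) c =>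
          let q := PySem.Int.bxor (PySem.Int.bxor (PySem.Dict.getD st2.1 (c + 1) 0)
                     (PySem.Dict.getD st.1 c 0)) (PySem.Dict.getD st.1 (c + 1) 0)
          let v := pvGet2 grid r c
          if (v = 0 ∨ v = 1) ∧ PySem.Int.bxor v q = 1 then
            (PySem.Dict.insert st2.1 c (PySem.Int.bxor q 1), st2.2 + 1)
          else
            (PySem.Dict.insert st2.1 c q, st2.2))
        (PySem.Dict.empty, st.2))
    (PySem.Dict.empty, 0)).2

-- ===== PRECONDITION & SPEC =====
-- Pre_ admits square grids (the task's natural domain) and grids without any 1 entry (on which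
-- nothing ever triggers); on the remaining ragged grids a triggered flip rectangle can overrun a
-- short row, making A raise IndexError, and whether it does depends on A's mutation dynamics, so
-- those accidental survivors are excluded wholesale.
def Pre_follow_through (grid : List (List Int)) : Prop :=
  (∀ row ∈ grid, row.length = grid.length) ∨ (∀ row ∈ grid, ∀ v ∈ row, v ≠ 1)
instance (grid : List (List Int)) : Decidable (Pre_follow_through grid) := by
  unfold Pre_follow_through; infer_instance

def pvWitness_follow_through : List (List Int) := [[1, 0], [0, 1]]

def Spec_follow_through (grid : List (List Int)) (out : Int) : Prop := out = follow_through_alt grid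
instance (grid : List (List Int)) (out : Int) : Decidable (Spec_follow_through grid out) := by
  unfold Spec_follow_through; infer_instance

-- ===== CLAIM (what is proved, stated in full; the proofs are below) =====
def Claim_equal_follow_through : Prop := ∀ (grid : List (List Int)), Dom_follow_through grid → Pre_follow_through grid → Spec_follow_through grid (follow_through grid)

-- ===== LEMMAS AND PROOFS =====
def gA (g : List (List Int)) (i j : Nat) : Int := (g.getD i []).getD j 0

def pvFlip (v : Int) : Int := if v = 0 then 1 else if v = 1 then 0 else v

def pvAdj (v : Int) (b : Bool) : Int := if b then pvFlip v else v

def pvToI (b : Bool) : Int := if b then 1 else 0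

def pvQ (g : List (List Int)) (n r c : Nat) : Bool :=
  if _h : r < n ∧ c < n then
    (((gA g r c == 0) || (gA g r c == 1)) &&
      ((gA g r c == 1) ^^ (pvQ g n r (c+1) ^^ pvQ g n (r+1) c ^^ pvQ g n (r+1) (c+1))))
    ^^ (pvQ g n r (c+1) ^^ pvQ g n (r+1) c ^^ pvQ g n (r+1) (c+1))
  else false
termination_by (n - r) + (n - c)
decreasing_by all_goals omega

def pvTr (g : List (List Int)) (n r c : Nat) : Bool :=
  ((gA g r c == 0) || (gA g r c == 1)) &&
    ((gA g r c == 1) ^^ (pvQ g n r (c+1) ^^ pvQ g n (r+1) c ^^ pvQ g n (r+1) (c+1)))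

def pvRowPar (g : List (List Int)) (n r c : Nat) : Bool :=
  if c < n then pvTr g n r c ^^ pvRowPar g n r (c+1) else false
termination_by n - c
decreasing_by omega

def pvRowTot (g : List (List Int)) (n r c : Nat) : Int :=
  if c < n then pvToI (pvTr g n r c) + pvRowTot g n r (c+1) else 0
termination_by n - c
decreasing_by omega

def pvGridTot (g : List (List Int)) (n r : Nat) : Int :=
  if r < n then pvRowTot g n r 0 + pvGridTot g n (r+1) else 0
termination_by n - r
decreasing_by omega

def pvPf (g : List (List Int)) (n r k i j : Nat) : Bool :=
  pvQ g n (max i (r+1)) j ^^ (if i ≤ r then pvRowPar g n r (max j k) else false)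

theorem pvQ_out (g : List (List Int)) (n r c : Nat) (h : ¬ (r < n ∧ c < n)) :
    pvQ g n r c = false := by
  rw [pvQ]; simp [h]

theorem pvQ_def (g : List (List Int)) (n r c : Nat) (hr : r < n) (hc : c < n) :
    pvQ g n r c = (pvTr g n r c ^^ (pvQ g n r (c+1) ^^ pvQ g n (r+1) c ^^ pvQ g n (r+1) (c+1))) := by
  rw [pvQ]; simp [hr, hc, pvTr]

theorem pvRowPar_out (g : List (List Int)) (n r c : Nat) (h : ¬ c < n) :
    pvRowPar g n r c = false := by
  rw [pvRowPar]; simp [h]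

theorem pvQ_row (g : List (List Int)) (n r : Nat) (hr : r < n) (c : Nat) :
    pvQ g n r c = (pvRowPar g n r c ^^ pvQ g n (r+1) c) := by
  by_cases hc : c < n
  · have ih := pvQ_row g n r hr (c+1)
    rw [pvQ_def g n r c hr hc, pvRowPar, if_pos hc, ih]
    generalize pvTr g n r c = a
    generalize pvRowPar g n r (c+1) = b
    generalize pvQ g n (r+1) c = d
    generalize pvQ g n (r+1) (c+1) = e
    revert a b d e; decide
  · rw [pvQ_out g n r c (by omega), pvRowPar_out g n r c hc,
        pvQ_out g n (r+1) c (by omega)]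
    rfl
termination_by n - c
decreasing_by omega

theorem getD_set_eq {α : Type} (G : List α) (r i : Nat) (L d : α) :
    (G.set r L).getD i d = if i = r ∧ r < G.length then L else G.getD i d := by
  simp only [List.getD, List.getElem?_set]
  by_cases hi : i = r
  · subst hi
    by_cases h2 : i < G.length
    · simp [h2]
    · simp [h2, List.getElem?_eq_none (le_of_not_gt h2)]
  · simp [hi, Ne.symm hi]

def pvCellFlip (G : List (List Int)) (r c : Nat) : List (List Int) :=
  if gA G r c = 0 then G.set r ((G.getD r []).set c 1)
  else if gA G r c = 1 then G.set r ((G.getD r []).set c 0)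
  else G

def pvRowFlipN (L : List Int) (C : Nat) : List Int :=
  (List.range C).foldl
    (fun L c => if L.getD c 0 = 0 then L.set c 1 else if L.getD c 0 = 1 then L.set c 0 else L) L

def pvDblFlip (G : List (List Int)) (R C : Nat) : List (List Int) :=
  (List.range R).foldl (fun G2 r => (List.range C).foldl (fun G3 c => pvCellFlip G3 r c) G2) G

theorem length_pvRowFlipN (L : List Int) (C : Nat) : (pvRowFlipN L C).length = L.length := by
  induction C with
  | zero => rfl
  | succ C ih =>
    unfold pvRowFlipN
    rw [List.range_succ, List.foldl_append]
    simp only [List.foldl_cons, List.foldl_nil]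
    have hfold : (List.range C).foldl
        (fun L c => if L.getD c 0 = 0 then L.set c 1 else if L.getD c 0 = 1 then L.set c 0 else L) L
        = pvRowFlipN L C := rfl
    rw [hfold]
    split_ifs <;> (try simp only [List.length_set]) <;> exact ih

theorem getD_pvRowFlipN (L : List Int) (C : Nat) (hC : C ≤ L.length) (j : Nat) :
    (pvRowFlipN L C).getD j 0 = if j < C then pvFlip (L.getD j 0) else L.getD j 0 := by
  induction C generalizing j with
  | zero => simp [pvRowFlipN]
  | succ C ih =>
    have hC' : C ≤ L.length := by omega
    unfold pvRowFlipN
    rw [List.range_succ, List.foldl_append]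
    simp only [List.foldl_cons, List.foldl_nil]
    have hfold : (List.range C).foldl
        (fun L c => if L.getD c 0 = 0 then L.set c 1 else if L.getD c 0 = 1 then L.set c 0 else L) L
        = pvRowFlipN L C := rfl
    rw [hfold]
    have hlen : (pvRowFlipN L C).length = L.length := length_pvRowFlipN L C
    have hSC : (pvRowFlipN L C).getD C 0 = L.getD C 0 := by rw [ih hC' C]; simp
    have hset : ∀ (x : Int), ((pvRowFlipN L C).set C x).getD j 0
        = if j = C then x else (pvRowFlipN L C).getD j 0 := by
      intro x; rw [getD_set_eq]
      rcases eq_or_ne j C with rfl | hne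
      · simp [hlen]; omega
      · simp [hne]
    rw [hSC]
    by_cases h0 : L.getD C 0 = 0
    · rw [if_pos h0, hset]
      by_cases hj : j = C
      · subst hj
        rw [if_pos rfl, if_pos (Nat.lt_succ_self _), h0]
        norm_num [pvFlip]
      · rw [if_neg hj, ih hC' j]
        split_ifs <;> first | rfl | omega
    · rw [if_neg h0]
      by_cases h1 : L.getD C 0 = 1
      · rw [if_pos h1, hset]
        by_cases hj : j = C
        · subst hj
          rw [if_pos rfl, if_pos (Nat.lt_succ_self _), h1]
          norm_num [pvFlip]
        · rw [if_neg hj, ih hC' j]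
          split_ifs <;> first | rfl | omega
      · rw [if_neg h1, ih hC' j]
        by_cases hj : j = C
        · subst hj
          rw [if_neg (lt_irrefl _), if_pos (Nat.lt_succ_self _)]
          simp only [pvFlip, if_neg h0, if_neg h1]
        · split_ifs <;> first | rfl | omega

theorem set_getD_self (G : List (List Int)) (r : Nat) (hr : r < G.length) :
    G.set r (G.getD r []) = G := by
  rw [List.getD_eq_getElem G [] hr, List.set_getElem_self]

theorem rowfold_eq (G : List (List Int)) (r : Nat) (C : Nat) (hr : r < G.length) :
    (List.range C).foldl (fun G3 c => pvCellFlip G3 r c) G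
      = G.set r (pvRowFlipN (G.getD r []) C) := by
  induction C with
  | zero =>
    simp only [List.range_zero, List.foldl_nil, pvRowFlipN]
    exact (set_getD_self G r hr).symm
  | succ C ih =>
    rw [List.range_succ, List.foldl_append, ih]
    simp only [List.foldl_cons, List.foldl_nil]
    have hgetr : (G.set r (pvRowFlipN (G.getD r []) C)).getD r [] = pvRowFlipN (G.getD r []) C := by
      rw [getD_set_eq]; simp [hr]
    have hga : gA (G.set r (pvRowFlipN (G.getD r []) C)) r C = (pvRowFlipN (G.getD r []) C).getD C 0 := by
      rw [gA, hgetr]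
    have hstep : pvRowFlipN (G.getD r []) (C+1)
        = (if (pvRowFlipN (G.getD r []) C).getD C 0 = 0 then (pvRowFlipN (G.getD r []) C).set C 1
           else if (pvRowFlipN (G.getD r []) C).getD C 0 = 1 then (pvRowFlipN (G.getD r []) C).set C 0
           else (pvRowFlipN (G.getD r []) C)) := by
      unfold pvRowFlipN
      rw [List.range_succ, List.foldl_append]
      simp only [List.foldl_cons, List.foldl_nil]
    rw [pvCellFlip, hga, hgetr, hstep]
    split_ifs <;> simp [List.set_set]
theorem dblFlip_succ (G : List (List Int)) (R C : Nat) :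
    pvDblFlip G (R+1) C = (List.range C).foldl (fun G3 c => pvCellFlip G3 R c) (pvDblFlip G R C) := by
  unfold pvDblFlip
  rw [List.range_succ, List.foldl_append]
  simp only [List.foldl_cons, List.foldl_nil]

theorem length_dblFlip (G : List (List Int)) (R C : Nat) (hR : R ≤ G.length) :
    (pvDblFlip G R C).length = G.length := by
  induction R with
  | zero => rfl
  | succ R ih =>
    have hR' : R ≤ G.length := by omega
    rw [dblFlip_succ, rowfold_eq _ _ _ (by rw [ih hR']; omega)]
    rw [List.length_set, ih hR']

theorem getD_dblFlip (G : List (List Int)) (R C : Nat) (hR : R ≤ G.length) (i : Nat) :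
    (pvDblFlip G R C).getD i [] = if i < R then pvRowFlipN (G.getD i []) C else G.getD i [] := by
  induction R generalizing i with
  | zero => simp [pvDblFlip]
  | succ R ih =>
    have hR' : R ≤ G.length := by omega
    have hlen : (pvDblFlip G R C).length = G.length := length_dblFlip G R C hR'
    rw [dblFlip_succ, rowfold_eq _ _ _ (by omega : R < (pvDblFlip G R C).length), getD_set_eq]
    rw [ih hR' R, if_neg (lt_irrefl R), hlen]
    by_cases hi : i = R
    · subst hi; rw [if_pos ⟨rfl, by omega⟩, if_pos (by omega)]
    · rw [if_neg (by tauto), ih hR' i]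
      split_ifs <;> first | rfl | omega

theorem gA_dblFlip (G : List (List Int)) (R C : Nat) (hR : R ≤ G.length)
    (hC : ∀ i, i < R → C ≤ (G.getD i []).length) (i j : Nat) :
    gA (pvDblFlip G R C) i j = if i < R ∧ j < C then pvFlip (gA G i j) else gA G i j := by
  rw [gA, getD_dblFlip G R C hR i]
  by_cases hi : i < R
  · rw [if_pos hi, getD_pvRowFlipN _ _ (hC i hi) j, gA]
    by_cases hj : j < C
    · rw [if_pos hj, if_pos ⟨hi, hj⟩]
    · rw [if_neg hj, if_neg (by tauto)]
  · rw [if_neg hi, if_neg (by tauto), gA]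

theorem rowlen_dblFlip (G : List (List Int)) (R C : Nat) (hR : R ≤ G.length) (i : Nat) :
    ((pvDblFlip G R C).getD i []).length = (G.getD i []).length := by
  rw [getD_dblFlip G R C hR i]
  split_ifs with h
  · exact length_pvRowFlipN _ _
  · rfl

-- pvFlip / pvAdj algebra
theorem pvFlip_pvFlip (v : Int) : pvFlip (pvFlip v) = v := by
  unfold pvFlip
  split_ifs with h1 h2 <;> simp_all <;> omega

theorem pvFlip_pvAdj (v : Int) (b : Bool) : pvFlip (pvAdj v b) = pvAdj v (!b) := by
  cases b <;> simp [pvAdj, pvFlip_pvFlip]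

theorem pvAdj_eq_one_iff (v : Int) (b : Bool) :
    (pvAdj v b = 1) ↔ (((v == 0) || (v == 1)) && ((v == 1) ^^ b)) = true := by
  cases b <;> by_cases h0 : v = 0 <;> by_cases h1 : v = 1 <;>
    simp_all [pvAdj, pvFlip]

-- pvPf facts
theorem pvPf_zero (g : List (List Int)) (n r : Nat) (hr : r < n) (i j : Nat) :
    pvPf g n r 0 i j = pvQ g n (max i r) j := by
  unfold pvPf
  by_cases hi : i ≤ r
  · rw [if_pos hi]
    have h1 : max i (r+1) = r + 1 := by omega
    have h2 : max i r = r := by omega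
    have h3 : max j 0 = j := by omega
    rw [h1, h2, h3, pvQ_row g n r hr j]
    generalize pvRowPar g n r j = a
    generalize pvQ g n (r+1) j = b
    revert a b; decide
  · rw [if_neg hi]
    have h1 : max i (r+1) = i := by omega
    have h2 : max i r = i := by omega
    rw [h1, h2]
    simp

theorem pvPf_top (g : List (List Int)) (n r : Nat) (i j : Nat) :
    pvPf g n r n i j = pvQ g n (max i (r+1)) j := by
  unfold pvPf
  by_cases hi : i ≤ r
  · rw [if_pos hi, pvRowPar_out g n r (max j n) (by omega)]
    simp
  · rw [if_neg hi]; simp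

theorem pvPf_self (g : List (List Int)) (n r k : Nat) (hr : r < n) :
    pvPf g n r (k+1) r k = (pvQ g n r (k+1) ^^ pvQ g n (r+1) k ^^ pvQ g n (r+1) (k+1)) := by
  unfold pvPf
  have h1 : max r (r+1) = r + 1 := by omega
  have h2 : max k (k+1) = k + 1 := by omega
  rw [h1, if_pos (le_refl r), h2, pvQ_row g n r hr (k+1)]
  generalize pvRowPar g n r (k+1) = a
  generalize pvQ g n (r+1) k = b
  generalize pvQ g n (r+1) (k+1) = d
  revert a b d; decide

theorem pvPf_step (g : List (List Int)) (n r k : Nat) (hr : r < n) (hk : k < n) (i j : Nat) :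
    pvPf g n r k i j
      = (pvPf g n r (k+1) i j ^^ (pvTr g n r k && (decide (i ≤ r) && decide (j ≤ k)))) := by
  unfold pvPf
  by_cases hi : i ≤ r
  · rw [if_pos hi, if_pos hi]
    by_cases hj : j ≤ k
    · have h1 : max j k = k := by omega
      have h2 : max j (k+1) = k + 1 := by omega
      rw [h1, h2, pvRowPar, if_pos hk]
      simp [hi, hj]
      generalize pvQ g n (max i (r+1)) j = a
      generalize pvTr g n r k = b
      generalize pvRowPar g n r (k+1) = d
      revert a b d; decide
    · have h1 : max j k = j := by omega
      have h2 : max j (k+1) = j := by omega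
      rw [h1, h2]
      simp [hj]
  · rw [if_neg hi, if_neg hi]
    simp [hi]

-- reading grid[-(n-r)][-(n-c)] on an n×n grid is reading entry (r, c)
theorem pvGet2_neg (X : List (List Int)) (n r c : Nat) (hlen : X.length = n)
    (hr : r < n) (hrowlen : (X.getD r []).length = n) (hc : c < n) :
    pvGet2 X (-((n - r : Nat) : Int)) (-((n - c : Nat) : Int)) = gA X r c := by
  unfold pvGet2 gA
  rw [PySem.List.pyGetD_neg_natCast X (n - r) [] (by omega) (by omega)]
  have h1 : X[X.length - (n - r)] = X.getD r [] := by
    rw [List.getD_eq_getElem X [] (by omega)]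
    congr 1
    omega
  rw [h1, PySem.List.pyGetD_neg_natCast (X.getD r []) (n - c) 0 (by omega) (by omega)]
  rw [List.getD_eq_getElem (X.getD r []) 0 (by omega)]
  congr 1
  omega

theorem pyGetD_neg_row (X : List (List Int)) (n r : Nat) (hlen : X.length = n) (hr : r < n) :
    PySem.List.pyGetD X (-((n - r : Nat) : Int)) [] = X.getD r [] := by
  rw [PySem.List.pyGetD_neg_natCast X (n - r) [] (by omega) (by omega)]
  rw [List.getD_eq_getElem X [] (by omega)]
  congr 1
  omega

-- the Int-level double flip loop of port A is pvDblFlip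
theorem dblBridge (G : List (List Int)) (R C : Nat) :
    (PySem.List.pyRange 0 ((R : Int)) 1).foldl
      (fun (g : List (List Int)) r =>
        (PySem.List.pyRange 0 ((C : Int)) 1).foldl
          (fun (g : List (List Int)) c =>
            if pvGet2 g r c = 0 then pvSet2 g r c 1
            else if pvGet2 g r c = 1 then pvSet2 g r c 0
            else g) g) G
      = pvDblFlip G R C := by
  rw [PySem.List.pyRange_zero_nat, PySem.List.pyRange_zero_nat, List.foldl_map]
  unfold pvDblFlip
  congr 1
  funext G2 r
  rw [List.foldl_map]
  congr 1
  funext G3 c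
  unfold pvCellFlip pvSet2 pvGet2 gA
  simp only [PySem.List.pyGetD_natCast, PySem.List.pySetD_natCast]

def InvIn (g : List (List Int)) (n r mc : Nat) (st : List (List Int) × Int) : Prop :=
  st.1.length = n ∧ (∀ i, i < n → (st.1.getD i []).length = n) ∧
  (∀ i j, i < n → j < n → gA st.1 i j = pvAdj (gA g i j) (pvPf g n r mc i j)) ∧
  st.2 = pvGridTot g n (r+1) + pvRowTot g n r mc

theorem A_inner (g : List (List Int)) (n r : Nat) (hr : r < n) (row : Int)
    (hrow : row = -((n - r : Nat) : Int)) :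
    ∀ (mc : Nat), mc ≤ n → ∀ (st : List (List Int) × Int), InvIn g n r mc st →
    InvIn g n r 0
      (((PySem.List.pyRange ((n - mc : Nat) + 1 : Int) ((n : Int) + 1) 1).map (fun x => -x)).foldl
        (fun (st : List (List Int) × Int) column =>
          if pvGet2 st.1 row column = 1 then
            (((PySem.List.pyRange 0 (PySem.List.len st.1 + 1 + row) 1).foldl
                (fun (g : List (List Int)) r =>
                  (PySem.List.pyRange 0 (PySem.List.len st.1 + 1 + column) 1).foldl
                    (fun (g : List (List Int)) c =>
                      if pvGet2 g r c = 0 then pvSet2 g r c 1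
                      else if pvGet2 g r c = 1 then pvSet2 g r c 0
                      else g) g) st.1),
             st.2 + 1)
          else st) st) := by
  intro mc
  induction mc with
  | zero =>
    intro _ st hst
    rw [PySem.List.pyRange_one_eq_nil (by simp)]
    simpa using hst
  | succ k ih =>
    intro hk st hst
    obtain ⟨hlen, hrowlen, hval, hcnt⟩ := hst
    have hkn : k < n := by omega
    have hsub : (n - (k+1) : Nat) + 1 = ((n - k : Nat) : Int) := by push_cast; omega
    rw [hsub, PySem.List.pyRange_one_cons (by push_cast; omega), List.map_cons, List.foldl_cons]
    -- the column just processed is c = k, Python index -(n-k)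
    have hcol : -((n - k : Nat) : Int) = -((n - k : Nat) : Int) := rfl
    have hread : pvGet2 st.1 row (-((n - k : Nat) : Int)) = gA st.1 r k :=
      hrow ▸ pvGet2_neg st.1 n r k hlen hr (hrowlen r hr) hkn
    have hreadv : gA st.1 r k = pvAdj (gA g r k) (pvPf g n r (k+1) r k) := hval r k hr hkn
    have htrig : (pvGet2 st.1 row (-((n - k : Nat) : Int)) = 1) ↔ pvTr g n r k = true := by
      rw [hread, hreadv, pvAdj_eq_one_iff, pvPf_self g n r k hr]
      unfold pvTr
      exact Iff.rfl
    have hbndR : (PySem.List.len st.1 + 1 + row : Int) = ((r + 1 : Nat) : Int) := by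
      rw [PySem.List.len_eq, hlen, hrow]; push_cast; omega
    have hbndC : (PySem.List.len st.1 + 1 + -((n - k : Nat) : Int) : Int) = ((k + 1 : Nat) : Int) := by
      rw [PySem.List.len_eq, hlen]; push_cast; omega
    by_cases htr : pvTr g n r k = true
    · rw [if_pos (htrig.mpr htr), hbndR, hbndC, dblBridge]
      apply ih (by omega)
      refine ⟨?_, ?_, ?_, ?_⟩
      · simp only [length_dblFlip st.1 (r+1) (k+1) (by omega), hlen]
      · intro i hi
        simp only [rowlen_dblFlip st.1 (r+1) (k+1) (by omega) i]
        exact hrowlen i hi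
      · intro i j hi hj
        rw [gA_dblFlip st.1 (r+1) (k+1) (by omega)
              (fun i hi2 => by rw [hrowlen i (by omega)]; omega) i j]
        rw [pvPf_step g n r k hr hkn i j, htr]
        by_cases hij : i < r + 1 ∧ j < k + 1
        · rw [if_pos hij, hval i j hi hj, pvFlip_pvAdj]
          congr 1
          have h1 : i ≤ r := by omega
          have h2 : j ≤ k := by omega
          simp [h1, h2, Bool.xor_true]
        · rw [if_neg hij, hval i j hi hj]
          congr 1
          have hf : (decide (i ≤ r) && decide (j ≤ k)) = false := by
            simp only [Bool.and_eq_false_iff, decide_eq_false_iff_not]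
            omega
          simp [hf]
      · simp only [hcnt]
        rw [show pvRowTot g n r k = pvToI (pvTr g n r k) + pvRowTot g n r (k+1) from by
              rw [pvRowTot, if_pos hkn], htr]
        simp only [pvToI, if_true]
        ring
    · rw [if_neg (fun h => htr (htrig.mp h))]
      apply ih (by omega)
      have htr' : pvTr g n r k = false := by
        cases h : pvTr g n r k
        · rfl
        · exact absurd h htr
      refine ⟨hlen, hrowlen, ?_, ?_⟩
      · intro i j hi hj
        rw [hval i j hi hj, pvPf_step g n r k hr hkn i j, htr']
        simp
      · rw [hcnt, show pvRowTot g n r k = pvToI (pvTr g n r k) + pvRowTot g n r (k+1) from by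
              rw [pvRowTot, if_pos hkn], htr']
        simp [pvToI]

theorem pvRowTot_out (g : List (List Int)) (n r c : Nat) (h : ¬ c < n) :
    pvRowTot g n r c = 0 := by
  rw [pvRowTot, if_neg h]

def InvA (g : List (List Int)) (n m : Nat) (st : List (List Int) × Int) : Prop :=
  st.1.length = n ∧ (∀ i, i < n → (st.1.getD i []).length = n) ∧
  (∀ i j, i < n → j < n → gA st.1 i j = pvAdj (gA g i j) (pvQ g n (max i m) j)) ∧
  st.2 = pvGridTot g n m

theorem InvA_to_InvIn_top (g : List (List Int)) (n r : Nat) (hr : r < n)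
    (st : List (List Int) × Int) (h : InvA g n (r+1) st) : InvIn g n r n st := by
  obtain ⟨h1, h2, h3, h4⟩ := h
  refine ⟨h1, h2, ?_, ?_⟩
  · intro i j hi hj
    rw [h3 i j hi hj, pvPf_top]
  · rw [h4, pvRowTot_out g n r n (by omega)]
    ring

theorem InvIn_zero_to_InvA (g : List (List Int)) (n r : Nat) (hr : r < n)
    (st : List (List Int) × Int) (h : InvIn g n r 0 st) : InvA g n r st := by
  obtain ⟨h1, h2, h3, h4⟩ := h
  refine ⟨h1, h2, ?_, ?_⟩
  · intro i j hi hj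
    rw [h3 i j hi hj, pvPf_zero g n r hr]
  · rw [h4, show pvGridTot g n r = pvRowTot g n r 0 + pvGridTot g n (r+1) from by
        rw [pvGridTot, if_pos hr]]
    ring

theorem A_outer (g : List (List Int)) (n : Nat) :
    ∀ (m : Nat), m ≤ n → ∀ (st : List (List Int) × Int), InvA g n m st →
    (((PySem.List.pyRange ((n - m : Nat) + 1 : Int) ((n : Int) + 1) 1).map (fun x => -x)).foldl
      (fun (st : List (List Int) × Int) row =>
        ((PySem.List.pyRange 1 (PySem.List.len (PySem.List.pyGetD st.1 row []) + 1) 1).map (fun x => -x)).foldl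
          (fun (st : List (List Int) × Int) column =>
            if pvGet2 st.1 row column = 1 then
              (((PySem.List.pyRange 0 (PySem.List.len st.1 + 1 + row) 1).foldl
                  (fun (g : List (List Int)) r =>
                    (PySem.List.pyRange 0 (PySem.List.len st.1 + 1 + column) 1).foldl
                      (fun (g : List (List Int)) c =>
                        if pvGet2 g r c = 0 then pvSet2 g r c 1
                        else if pvGet2 g r c = 1 then pvSet2 g r c 0
                        else g) g) st.1),
               st.2 + 1)
            else st) st) st).2 = pvGridTot g n 0 := by
  intro m
  induction m with
  | zero =>
    intro _ st hst
    rw [PySem.List.pyRange_one_eq_nil (by simp)]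
    simp only [List.map_nil, List.foldl_nil]
    exact hst.2.2.2
  | succ m ih =>
    intro hm st hst
    obtain ⟨hlen, hrowlen, hval, hcnt⟩ := hst
    have hmn : m < n := by omega
    have hsub : ((n - (m+1) : Nat) + 1 : Int) = ((n - m : Nat) : Int) := by push_cast; omega
    rw [hsub, PySem.List.pyRange_one_cons (by push_cast; omega), List.map_cons, List.foldl_cons]
    have hrowlist : PySem.List.pyGetD st.1 (-((n - m : Nat) : Int)) [] = st.1.getD m [] :=
      pyGetD_neg_row st.1 n m hlen hmn
    have hlenrow : (PySem.List.len (PySem.List.pyGetD st.1 (-((n - m : Nat) : Int)) []) + 1 : Int)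
        = ((n : Int) + 1) := by
      rw [hrowlist, PySem.List.len_eq, hrowlen m hmn]
    rw [hlenrow]
    have hinner := A_inner g n m hmn (-((n - m : Nat) : Int)) rfl n (le_refl n) st
      (InvA_to_InvIn_top g n m hmn st ⟨hlen, hrowlen, hval, hcnt⟩)
    rw [show ((n - n : Nat) + 1 : Int) = 1 from by push_cast; omega] at hinner
    exact ih (by omega) _ (InvIn_zero_to_InvA g n m hmn _ hinner)

theorem A_eq (g : List (List Int)) (hsq : ∀ row ∈ g, row.length = g.length) :
    follow_through g = pvGridTot g g.length 0 := by
  have hinit : InvA g g.length g.length (g, 0) := by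
    refine ⟨rfl, ?_, ?_, ?_⟩
    · intro i hi
      rw [List.getD_eq_getElem g [] hi]
      exact hsq _ (List.getElem_mem hi)
    · intro i j hi hj
      rw [pvQ_out g g.length (max i g.length) j (by omega)]
      rfl
    · rw [pvGridTot, if_neg (lt_irrefl _)]
  have h := A_outer g g.length g.length (le_refl _) (g, 0) hinit
  rw [show ((g.length - g.length : Nat) + 1 : Int) = 1 from by push_cast; omega] at h
  unfold follow_through
  rw [PySem.List.len_eq]
  exact h

-- B-side: Bool/Int 0-1 encodings
theorem bxor_toI (a b : Bool) : PySem.Int.bxor (pvToI a) (pvToI b) = pvToI (a ^^ b) := by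
  cases a <;> cases b <;> decide

theorem bxor_toI_one (b : Bool) : PySem.Int.bxor (pvToI b) 1 = pvToI (!b) := by
  cases b <;> decide

theorem trig_iff (v : Int) (b : Bool) :
    ((v = 0 ∨ v = 1) ∧ PySem.Int.bxor v (pvToI b) = 1)
      ↔ (((v == 0) || (v == 1)) && ((v == 1) ^^ b)) = true := by
  by_cases h0 : v = 0
  · subst h0; cases b <;> simp [pvToI] <;> decide
  · by_cases h1 : v = 1
    · subst h1; cases b <;> simp [pvToI] <;> decide
    · simp [h0, h1]

theorem pvGet2_natCast (g : List (List Int)) (r c : Nat) :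
    pvGet2 g ((r : Int)) ((c : Int)) = gA g r c := by
  simp [pvGet2, gA, PySem.List.pyGetD_natCast]

theorem B_inner (g : List (List Int)) (n rr : Nat) (hr : rr < n)
    (r : Int) (hrc : r = (rr : Int)) (below : PySem.Dict Int Int)
    (hbelow : ∀ j : Nat, j ≤ n → PySem.Dict.getD below ((j : Nat) : Int) 0 = pvToI (pvQ g n (rr+1) j)) :
    ∀ (mc : Nat), mc ≤ n → ∀ (cur : PySem.Dict Int Int) (t : Int),
    (∀ j : Nat, mc ≤ j → j ≤ n → PySem.Dict.getD cur ((j : Nat) : Int) 0 = pvToI (pvQ g n rr j)) →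
    ((∀ j : Nat, j ≤ n → ((PySem.List.pyRange ((mc : Int) - 1) (-1) (-1)).foldl
        (fun (st2 : PySem.Dict Int Int × Int) c =>
          if (pvGet2 g r c = 0 ∨ pvGet2 g r c = 1) ∧
              PySem.Int.bxor (pvGet2 g r c)
                (PySem.Int.bxor (PySem.Int.bxor (PySem.Dict.getD st2.1 (c + 1) 0)
                  (PySem.Dict.getD below c 0)) (PySem.Dict.getD below (c + 1) 0)) = 1 then
            (PySem.Dict.insert st2.1 c
              (PySem.Int.bxor (PySem.Int.bxor (PySem.Int.bxor (PySem.Dict.getD st2.1 (c + 1) 0)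
                (PySem.Dict.getD below c 0)) (PySem.Dict.getD below (c + 1) 0)) 1), st2.2 + 1)
          else
            (PySem.Dict.insert st2.1 c
              (PySem.Int.bxor (PySem.Int.bxor (PySem.Dict.getD st2.1 (c + 1) 0)
                (PySem.Dict.getD below c 0)) (PySem.Dict.getD below (c + 1) 0)), st2.2))
        (cur, t)).1.getD ((j : Nat) : Int) 0 = pvToI (pvQ g n rr j)) ∧
     ((PySem.List.pyRange ((mc : Int) - 1) (-1) (-1)).foldl
        (fun (st2 : PySem.Dict Int Int × Int) c =>
          if (pvGet2 g r c = 0 ∨ pvGet2 g r c = 1) ∧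
              PySem.Int.bxor (pvGet2 g r c)
                (PySem.Int.bxor (PySem.Int.bxor (PySem.Dict.getD st2.1 (c + 1) 0)
                  (PySem.Dict.getD below c 0)) (PySem.Dict.getD below (c + 1) 0)) = 1 then
            (PySem.Dict.insert st2.1 c
              (PySem.Int.bxor (PySem.Int.bxor (PySem.Int.bxor (PySem.Dict.getD st2.1 (c + 1) 0)
                (PySem.Dict.getD below c 0)) (PySem.Dict.getD below (c + 1) 0)) 1), st2.2 + 1)
          else
            (PySem.Dict.insert st2.1 c
              (PySem.Int.bxor (PySem.Int.bxor (PySem.Dict.getD st2.1 (c + 1) 0)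
                (PySem.Dict.getD below c 0)) (PySem.Dict.getD below (c + 1) 0)), st2.2))
        (cur, t)).2 = t + (pvRowTot g n rr 0 - pvRowTot g n rr mc)) := by
  subst hrc
  intro mc
  induction mc with
  | zero =>
    intro _ cur t hcur
    rw [show ((0 : Nat) : Int) - 1 = -1 from by norm_num,
        PySem.List.pyRange_neg_one_eq_nil (by norm_num)]
    simp only [List.foldl_nil]
    refine ⟨fun j hj => hcur j (by omega) hj, by ring⟩
  | succ k ih =>
    intro hk cur t hcur
    have hkn : k < n := by omega
    rw [show ((k + 1 : Nat) : Int) - 1 = ((k : Nat) : Int) from by push_cast; ring,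
        PySem.List.pyRange_neg_one_cons (by push_cast; omega), List.foldl_cons]
    simp only
    have h1 : PySem.Dict.getD cur ((k : Int) + 1) 0 = pvToI (pvQ g n rr (k+1)) := by
      rw [show ((k : Int) + 1) = ((k + 1 : Nat) : Int) from by push_cast; ring]
      exact hcur (k+1) (le_refl _) (by omega)
    have h2 : PySem.Dict.getD below ((k : Int)) 0 = pvToI (pvQ g n (rr+1) k) :=
      hbelow k (by omega)
    have h3 : PySem.Dict.getD below ((k : Int) + 1) 0 = pvToI (pvQ g n (rr+1) (k+1)) := by
      rw [show ((k : Int) + 1) = ((k + 1 : Nat) : Int) from by push_cast; ring]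
      exact hbelow (k+1) (by omega)
    rw [h1, h2, h3, bxor_toI, bxor_toI, pvGet2_natCast]
    have hQdef : pvQ g n rr k
        = (pvTr g n rr k ^^ (pvQ g n rr (k+1) ^^ pvQ g n (rr+1) k ^^ pvQ g n (rr+1) (k+1))) :=
      pvQ_def g n rr k hr hkn
    have hrow : pvRowTot g n rr k = pvToI (pvTr g n rr k) + pvRowTot g n rr (k+1) := by
      rw [pvRowTot, if_pos hkn]
    by_cases htr : pvTr g n rr k = true
    · have hcond := (trig_iff (gA g rr k)
          (pvQ g n rr (k+1) ^^ pvQ g n (rr+1) k ^^ pvQ g n (rr+1) (k+1))).mpr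
          (by unfold pvTr at htr; exact htr)
      rw [if_pos hcond, bxor_toI_one]
      have := ih (by omega)
        (PySem.Dict.insert cur ((k : Nat) : Int)
          (pvToI (!(pvQ g n rr (k+1) ^^ pvQ g n (rr+1) k ^^ pvQ g n (rr+1) (k+1))))) (t + 1) ?_
      · obtain ⟨hb, hc⟩ := this
        refine ⟨hb, ?_⟩
        have hceq : (t + 1) + (pvRowTot g n rr 0 - pvRowTot g n rr k)
            = t + (pvRowTot g n rr 0 - pvRowTot g n rr (k+1)) := by
          rw [hrow, htr]; simp [pvToI]; ring
        exact hc.trans hceq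
      · intro j hj hj2
        rw [PySem.Dict.getD_insert]
        by_cases hje : j = k
        · subst hje
          rw [if_pos rfl, hQdef, htr]
          simp
        · rw [if_neg (by exact_mod_cast hje)]
          exact hcur j (by omega) hj2
    · have htr' : pvTr g n rr k = false := by
        cases h : pvTr g n rr k
        · rfl
        · exact absurd h htr
      rw [if_neg (fun h => htr (by unfold pvTr; exact (trig_iff _ _).mp h))]
      have := ih (by omega)
        (PySem.Dict.insert cur ((k : Nat) : Int)
          (pvToI (pvQ g n rr (k+1) ^^ pvQ g n (rr+1) k ^^ pvQ g n (rr+1) (k+1)))) t ?_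
      · obtain ⟨hb, hc⟩ := this
        refine ⟨hb, ?_⟩
        have hceq : t + (pvRowTot g n rr 0 - pvRowTot g n rr k)
            = t + (pvRowTot g n rr 0 - pvRowTot g n rr (k+1)) := by
          rw [hrow, htr']; simp [pvToI]
        exact hc.trans hceq
      · intro j hj hj2
        rw [PySem.Dict.getD_insert]
        by_cases hje : j = k
        · subst hje
          rw [if_pos rfl, hQdef, htr']
          simp
        · rw [if_neg (by exact_mod_cast hje)]
          exact hcur j (by omega) hj2

theorem B_outer (g : List (List Int)) (n : Nat) (hlen : g.length = n)
    (hrows : ∀ i, i < n → (g.getD i []).length = n) :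
    ∀ (m : Nat), m ≤ n → ∀ (below : PySem.Dict Int Int) (t : Int),
    (∀ j : Nat, j ≤ n → PySem.Dict.getD below ((j : Nat) : Int) 0 = pvToI (pvQ g n m j)) →
    ((PySem.List.pyRange ((m : Int) - 1) (-1) (-1)).foldl
      (fun (st : PySem.Dict Int Int × Int) r =>
        (PySem.List.pyRange (PySem.List.len (PySem.List.pyGetD g r []) - 1) (-1) (-1)).foldl
          (fun (st2 : PySem.Dict Int Int × Int) c =>
            let q := PySem.Int.bxor (PySem.Int.bxor (PySem.Dict.getD st2.1 (c + 1) 0)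
                       (PySem.Dict.getD st.1 c 0)) (PySem.Dict.getD st.1 (c + 1) 0)
            let v := pvGet2 g r c
            if (v = 0 ∨ v = 1) ∧ PySem.Int.bxor v q = 1 then
              (PySem.Dict.insert st2.1 c (PySem.Int.bxor q 1), st2.2 + 1)
            else
              (PySem.Dict.insert st2.1 c q, st2.2))
          (PySem.Dict.empty, st.2))
      (below, t)).2 = t + (pvGridTot g n 0 - pvGridTot g n m) := by
  intro m
  induction m with
  | zero =>
    intro _ below t hbel
    have h0 : PySem.List.pyRange (((0 : Nat) : Int) - 1) (-1) (-1) = [] := by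
      rw [show (((0 : Nat) : Int) - 1) = -1 from by norm_num]
      exact PySem.List.pyRange_neg_one_eq_nil (by norm_num)
    rw [h0]
    simp only [List.foldl_nil]
    ring
  | succ k ih =>
    intro hm below t hbel
    have hkn : k < n := by omega
    have hcons : PySem.List.pyRange (((k + 1 : Nat) : Int) - 1) (-1) (-1)
        = ((k : Nat) : Int) :: PySem.List.pyRange (((k : Nat) : Int) - 1) (-1) (-1) := by
      rw [show (((k + 1 : Nat) : Int) - 1) = ((k : Nat) : Int) from by push_cast; ring]
      exact PySem.List.pyRange_neg_one_cons (by push_cast; omega)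
    rw [hcons, List.foldl_cons]
    have hbound : PySem.List.len (PySem.List.pyGetD g ((k : Nat) : Int) []) - 1
        = ((n : Nat) : Int) - 1 := by
      rw [PySem.List.pyGetD_natCast, PySem.List.len_eq, hrows k hkn]
    rw [hbound]
    have hinner := B_inner g n k hkn ((k : Nat) : Int) rfl below hbel n (le_refl n)
      PySem.Dict.empty t
      (fun j hj hj2 => by
        rw [PySem.Dict.getD_empty, pvQ_out g n k j (by omega)]
        simp [pvToI])
    simp only []
    obtain ⟨hb, hc⟩ := hinner
    refine Eq.trans (ih (by omega) _ _ hb) ?_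
    rw [hc, pvRowTot_out g n k n (lt_irrefl n),
        show pvGridTot g n k = pvRowTot g n k 0 + pvGridTot g n (k+1) from by
          rw [pvGridTot, if_pos hkn]]
    ring

theorem pvGridTot_out (g : List (List Int)) (n r : Nat) (h : ¬ r < n) :
    pvGridTot g n r = 0 := by
  rw [pvGridTot, if_neg h]

theorem B_eq (g : List (List Int)) (hsq : ∀ row ∈ g, row.length = g.length) :
    follow_through_alt g = pvGridTot g g.length 0 := by
  unfold follow_through_alt
  simp only [PySem.List.len_eq]
  have h := B_outer g g.length rfl
    (fun i hi => by
      rw [List.getD_eq_getElem g [] hi]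
      exact hsq _ (List.getElem_mem hi))
    g.length (le_refl _) PySem.Dict.empty 0
    (fun j hj => by
      rw [PySem.Dict.getD_empty, pvQ_out g g.length g.length j (by omega)]
      simp [pvToI])
  have h2 : (0 : Int) + (pvGridTot g g.length 0 - pvGridTot g g.length g.length)
      = pvGridTot g g.length 0 := by
    rw [pvGridTot_out g g.length g.length (lt_irrefl _)]; ring
  exact h.trans h2

-- no-1 grids: neither program ever triggers
theorem foldl_const {α β : Type} (f : α → β → α) (s : α) (h : ∀ x, f s x = s) :
    ∀ (l : List β), l.foldl f s = s := by
  intro l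
  induction l with
  | nil => rfl
  | cons x xs ih => rw [List.foldl_cons, h x, ih]

theorem pyGetD_mem_or_default {α : Type} (xs : List α) (i : Int) (d : α) :
    PySem.List.pyGetD xs i d ∈ xs ∨ PySem.List.pyGetD xs i d = d := by
  by_cases h : PySem.Raise.InRange xs.length i
  · left
    apply PySem.List.pyGetD_mem
    exact h
  · right
    apply PySem.List.pyGetD_of_none
    rw [PySem.List.pyGet?_eq_none_iff]
    exact h

theorem pvGet2_ne_one (g : List (List Int)) (hno1 : ∀ row ∈ g, ∀ v ∈ row, v ≠ 1)
    (i j : Int) : pvGet2 g i j ≠ 1 := by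
  unfold pvGet2
  rcases pyGetD_mem_or_default (PySem.List.pyGetD g i []) j 0 with hm | he
  · rcases pyGetD_mem_or_default g i [] with hm2 | he2
    · exact hno1 _ hm2 _ hm
    · rw [he2] at hm
      exact absurd hm (List.not_mem_nil)
  · rw [he]
    norm_num

theorem A_eq0 (g : List (List Int)) (hno1 : ∀ row ∈ g, ∀ v ∈ row, v ≠ 1) :
    follow_through g = 0 := by
  unfold follow_through
  refine (congrArg Prod.snd (foldl_const _ _ ?_ _)).trans rfl
  intro row
  refine foldl_const _ _ ?_ _
  intro column
  exact if_neg (pvGet2_ne_one g hno1 row column)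

def pvAllZero (d : PySem.Dict Int Int) : Prop := ∀ k : Int, PySem.Dict.getD d k 0 = 0

theorem B_inner0 (g : List (List Int)) (hno1 : ∀ row ∈ g, ∀ v ∈ row, v ≠ 1)
    (below : PySem.Dict Int Int) (hb : pvAllZero below) (r : Int) :
    ∀ (L : List Int) (st2 : PySem.Dict Int Int × Int), pvAllZero st2.1 →
    pvAllZero ((L.foldl
      (fun (st2 : PySem.Dict Int Int × Int) c =>
        let q := PySem.Int.bxor (PySem.Int.bxor (PySem.Dict.getD st2.1 (c + 1) 0)
                   (PySem.Dict.getD below c 0)) (PySem.Dict.getD below (c + 1) 0)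
        let v := pvGet2 g r c
        if (v = 0 ∨ v = 1) ∧ PySem.Int.bxor v q = 1 then
          (PySem.Dict.insert st2.1 c (PySem.Int.bxor q 1), st2.2 + 1)
        else
          (PySem.Dict.insert st2.1 c q, st2.2)) st2).1) ∧
    (L.foldl
      (fun (st2 : PySem.Dict Int Int × Int) c =>
        let q := PySem.Int.bxor (PySem.Int.bxor (PySem.Dict.getD st2.1 (c + 1) 0)
                   (PySem.Dict.getD below c 0)) (PySem.Dict.getD below (c + 1) 0)
        let v := pvGet2 g r c
        if (v = 0 ∨ v = 1) ∧ PySem.Int.bxor v q = 1 then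
          (PySem.Dict.insert st2.1 c (PySem.Int.bxor q 1), st2.2 + 1)
        else
          (PySem.Dict.insert st2.1 c q, st2.2)) st2).2 = st2.2 := by
  intro L
  induction L with
  | nil => exact fun st2 hz => ⟨hz, rfl⟩
  | cons c cs ih =>
    intro st2 hz
    rw [List.foldl_cons]
    simp only [hz (c + 1), hb c, hb (c + 1)]
    rw [show PySem.Int.bxor (PySem.Int.bxor 0 0) 0 = 0 from by decide]
    have hcond : ¬ ((pvGet2 g r c = 0 ∨ pvGet2 g r c = 1) ∧
        PySem.Int.bxor (pvGet2 g r c) 0 = 1) := by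
      rintro ⟨hv, hq⟩
      rcases hv with h0 | h1
      · rw [h0] at hq
        exact absurd hq (by decide)
      · exact pvGet2_ne_one g hno1 r c h1
    rw [if_neg hcond]
    have := ih (PySem.Dict.insert st2.1 c 0, st2.2) ?_
    · exact this
    · intro k
      rw [PySem.Dict.getD_insert]
      split_ifs with h
      · rfl
      · exact hz k

theorem B_eq0 (g : List (List Int)) (hno1 : ∀ row ∈ g, ∀ v ∈ row, v ≠ 1) :
    follow_through_alt g = 0 := by
  unfold follow_through_alt
  simp only [PySem.List.len_eq]
  suffices h : ∀ (L : List Int) (st : PySem.Dict Int Int × Int), pvAllZero st.1 →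
      pvAllZero ((L.foldl
        (fun (st : PySem.Dict Int Int × Int) r =>
          (PySem.List.pyRange (PySem.List.len (PySem.List.pyGetD g r []) - 1) (-1) (-1)).foldl
            (fun (st2 : PySem.Dict Int Int × Int) c =>
              let q := PySem.Int.bxor (PySem.Int.bxor (PySem.Dict.getD st2.1 (c + 1) 0)
                         (PySem.Dict.getD st.1 c 0)) (PySem.Dict.getD st.1 (c + 1) 0)
              let v := pvGet2 g r c
              if (v = 0 ∨ v = 1) ∧ PySem.Int.bxor v q = 1 then
                (PySem.Dict.insert st2.1 c (PySem.Int.bxor q 1), st2.2 + 1)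
              else
                (PySem.Dict.insert st2.1 c q, st2.2))
            (PySem.Dict.empty, st.2)) st).1) ∧
      (L.foldl
        (fun (st : PySem.Dict Int Int × Int) r =>
          (PySem.List.pyRange (PySem.List.len (PySem.List.pyGetD g r []) - 1) (-1) (-1)).foldl
            (fun (st2 : PySem.Dict Int Int × Int) c =>
              let q := PySem.Int.bxor (PySem.Int.bxor (PySem.Dict.getD st2.1 (c + 1) 0)
                         (PySem.Dict.getD st.1 c 0)) (PySem.Dict.getD st.1 (c + 1) 0)
              let v := pvGet2 g r c
              if (v = 0 ∨ v = 1) ∧ PySem.Int.bxor v q = 1 then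
                (PySem.Dict.insert st2.1 c (PySem.Int.bxor q 1), st2.2 + 1)
              else
                (PySem.Dict.insert st2.1 c q, st2.2))
            (PySem.Dict.empty, st.2)) st).2 = st.2 by
    exact (h _ (PySem.Dict.empty, 0) (fun k => PySem.Dict.getD_empty k 0)).2
  intro L
  induction L with
  | nil => exact fun st hz => ⟨hz, rfl⟩
  | cons r rs ih =>
    intro st hz
    rw [List.foldl_cons]
    obtain ⟨h1, h2⟩ := B_inner0 g hno1 st.1 hz r
      (PySem.List.pyRange (PySem.List.len (PySem.List.pyGetD g r []) - 1) (-1) (-1))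
      (PySem.Dict.empty, st.2) (fun k => PySem.Dict.getD_empty k 0)
    have := ih _ h1
    refine ⟨this.1, this.2.trans h2⟩

-- ===== VERDICT (by name: the statement is the Claim_ definition above) =====
theorem follow_through_spec : Claim_equal_follow_through := by
  intro grid _hdom hpre
  unfold Spec_follow_through
  rcases hpre with hsq | hno1
  · rw [A_eq grid hsq, B_eq grid hsq]
  · rw [A_eq0 grid hno1, B_eq0 grid hno1]
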